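-- pv_equiv track=rewrite | github.com/kyleburns-dc143c/shift-cipher | main.py | shift_decrypt
-- ===== SOURCE A (Python) =====
-- def shift_decrypt(encrypted, shift):
--     decrypted = []
--
--     if shift > 25:
--         shift %= 25
--
--     for char in encrypted:
--         if (ord(char) + shift) > 122:
--             new_char = chr(ord(char) + shift - 26)
--             decrypted.append(new_char)
--         else:
--             new_char = chr(ord(char) + shift)
--             decrypted.append(new_char)
--     return ''.join(decrypted)
-- ===== SOURCE B (Python) =====
-- def shift_decrypt(encrypted, shift):
--     if shift > 25:
--         shift %= 25
--
--     def dec(s):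
--         if len(s) == 0:
--             return ''
--         if len(s) == 1:
--             code = ord(s) + shift
--             return chr(code - 26) if code > 122 else chr(code)
--         mid = len(s) // 2
--         return dec(s[:mid]) + dec(s[mid:])
--
--     return dec(encrypted)
-- ===== Notes on version B (the rewrite author's own statement) =====
-- stated objective: alternative
-- what changed: Replaces the linear append loop by a divide-and-conquer recursion that splits the string in halves, decrypts each half and concatenates (log-depth binary recursion instead of one left-to-right pass).
import Mathlib
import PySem

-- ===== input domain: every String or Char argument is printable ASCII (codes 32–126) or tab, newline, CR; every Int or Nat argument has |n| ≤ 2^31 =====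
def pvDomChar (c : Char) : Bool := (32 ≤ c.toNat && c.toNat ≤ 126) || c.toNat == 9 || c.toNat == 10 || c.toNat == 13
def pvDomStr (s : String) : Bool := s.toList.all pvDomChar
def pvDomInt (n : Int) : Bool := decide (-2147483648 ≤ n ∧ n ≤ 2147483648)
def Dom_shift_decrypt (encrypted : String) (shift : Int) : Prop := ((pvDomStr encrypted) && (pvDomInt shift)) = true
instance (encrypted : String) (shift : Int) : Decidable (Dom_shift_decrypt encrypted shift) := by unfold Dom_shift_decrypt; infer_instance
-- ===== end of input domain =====

-- B replaces A's left-to-right append loop by a divide-and-conquer recursion on string halves (alternative decomposition, not faster).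

-- ===== PORT A =====
def shift_decrypt (encrypted : String) (shift : Int) : String :=
  let shift := if shift > 25 then PySem.Int.mod shift 25 else shift
  let decrypted : List Char := encrypted.toList.foldl (fun acc char =>
    if (char.toNat : Int) + shift > 122 then
      acc ++ [Char.ofNat ((char.toNat : Int) + shift - 26).toNat]   -- chr; exact under Pre_ (code nonnegative and small)
    else
      acc ++ [Char.ofNat ((char.toNat : Int) + shift).toNat]) []
  String.mk decrypted

-- ===== PORT B =====
-- inner 'dec': divide and conquer on the (closure-captured) adjusted shift.
-- s[:mid] / s[mid:] with 0 ≤ mid ≤ len s are exactly List.take / List.drop.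
-- len(s) // 2 on a Nat-cast length is the Nat division (used for termination)
theorem pv_mid_eq (n : Nat) : PySem.Int.floordiv (n:Int) 2 = ((n/2 : Nat) : Int) := by
  exact_mod_cast PySem.Int.floordiv_natCast n 2

def shift_decrypt_dec (shift : Int) : List Char → List Char
  | [] => []
  | [c] =>
      let code := (c.toNat : Int) + shift
      if code > 122 then [Char.ofNat (code - 26).toNat] else [Char.ofNat code.toNat]
  | c₁ :: c₂ :: rest =>
      let s := c₁ :: c₂ :: rest
      let mid := (PySem.Int.floordiv (s.length : Int) 2).toNat   -- len(s) // 2, nonnegative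
      shift_decrypt_dec shift (s.take mid) ++ shift_decrypt_dec shift (s.drop mid)
termination_by l => l.length
decreasing_by
  · simp only [List.length_take, pv_mid_eq, Int.toNat_natCast, List.length_cons]
    omega
  · simp only [List.length_drop, pv_mid_eq, Int.toNat_natCast, List.length_cons]
    omega

def shift_decrypt_alt (encrypted : String) (shift : Int) : String :=
  let shift := if shift > 25 then PySem.Int.mod shift 25 else shift
  String.mk (shift_decrypt_dec shift encrypted.toList)

-- ===== PRECONDITION & SPEC =====
-- Pre_ excludes exactly the inputs where Python A raises ValueError in chr: shift ≤ 25 (so the %25 guard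
-- does not fire) and some character's code plus shift is negative.
def Pre_shift_decrypt (encrypted : String) (shift : Int) : Prop :=
  shift > 25 ∨ encrypted.toList.all (fun c => 0 ≤ (c.toNat : Int) + shift) = true
instance (encrypted : String) (shift : Int) : Decidable (Pre_shift_decrypt encrypted shift) := by unfold Pre_shift_decrypt; infer_instance
def pvWitness_shift_decrypt : String × Int := ("khoor", 3)

def Spec_shift_decrypt (encrypted : String) (shift : Int) (out : String) : Prop := out = shift_decrypt_alt encrypted shift
instance (encrypted : String) (shift : Int) (out : String) : Decidable (Spec_shift_decrypt encrypted shift out) := by unfold Spec_shift_decrypt; infer_instance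

-- ===== CLAIM (what is proved, stated in full; the proofs are below) =====
def Claim_equal_shift_decrypt : Prop := ∀ (encrypted : String) (shift : Int), Dom_shift_decrypt encrypted shift → Pre_shift_decrypt encrypted shift → Spec_shift_decrypt encrypted shift (shift_decrypt encrypted shift)

-- ===== LEMMAS AND PROOFS =====

-- the per-character transformation both ports apply
def shiftChar (shift : Int) (c : Char) : Char :=
  if (c.toNat : Int) + shift > 122 then Char.ofNat ((c.toNat : Int) + shift - 26).toNat
  else Char.ofNat ((c.toNat : Int) + shift).toNat

theorem dec_eq_map (shift : Int) (l : List Char) :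
    shift_decrypt_dec shift l = l.map (shiftChar shift) := by
  induction l using shift_decrypt_dec.induct shift with
  | case1 => simp [shift_decrypt_dec]
  | case2 c =>
      simp only [shift_decrypt_dec, shiftChar, List.map]
      split_ifs <;> rfl
  | case3 c =>
      simp only [shift_decrypt_dec, shiftChar, List.map]
      split_ifs <;> rfl
  | case4 c₁ c₂ rest s mid ihtake ihdrop =>
      rw [shift_decrypt_dec, ihtake, ihdrop, ← List.map_append, List.take_append_drop]

theorem foldl_eq_map (shift : Int) (l : List Char) :
    (l.foldl (fun acc char =>
      if (char.toNat : Int) + shift > 122 then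
        acc ++ [Char.ofNat ((char.toNat : Int) + shift - 26).toNat]
      else
        acc ++ [Char.ofNat ((char.toNat : Int) + shift).toNat]) []) = l.map (shiftChar shift) := by
  have h : ∀ (acc : List Char),
      (l.foldl (fun acc char =>
        if (char.toNat : Int) + shift > 122 then
          acc ++ [Char.ofNat ((char.toNat : Int) + shift - 26).toNat]
        else
          acc ++ [Char.ofNat ((char.toNat : Int) + shift).toNat]) acc) = acc ++ l.map (shiftChar shift) := by
    induction l with
    | nil => simp
    | cons c l ih =>
        intro acc
        simp only [List.foldl_cons, List.map_cons]
        rw [show (if (c.toNat : Int) + shift > 122 then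
              acc ++ [Char.ofNat ((c.toNat : Int) + shift - 26).toNat]
            else acc ++ [Char.ofNat ((c.toNat : Int) + shift).toNat]) = acc ++ [shiftChar shift c] by
          unfold shiftChar; split_ifs <;> rfl]
        rw [ih, List.append_assoc]
        rfl
  simpa using h []

theorem shift_decrypt_eq (encrypted : String) (shift : Int) :
    shift_decrypt encrypted shift = shift_decrypt_alt encrypted shift := by
  unfold shift_decrypt shift_decrypt_alt
  simp only [foldl_eq_map, dec_eq_map]

-- ===== VERDICT (by name: the statement is the Claim_ definition above) =====
theorem shift_decrypt_spec : Claim_equal_shift_decrypt := by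
  intro encrypted shift _ _
  exact shift_decrypt_eq encrypted shift
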